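-- pv_equiv track=rewrite | github.com/greb/aoc2023 | days/day12.py | gen_arrangements
-- ===== SOURCE A (Python) =====
-- def gen_arrangements(groups, n):
--     if not groups:
--         yield '.'*n
--         return
--
--     offset = 0
--     head, *tail = groups
--     while offset+head <= n:
--         chunk = '.'*offset + '#'*head
--         if tail:
--             chunk += '.'
--             next_n = n - (offset+head+1)
--         else:
--             next_n = n - (offset+head)
--         for next_chunk in gen_arrangements(tail, next_n):
--             yield chunk + next_chunk
--         offset += 1
-- ===== SOURCE B (Python) =====
-- def _comps(parts, budget):
--     # all tuples (as lists) of `parts` nonnegative ints summing to `budget`,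
--     # in ascending lexicographic order (first coordinate most significant)
--     if parts == 1:
--         yield [budget]
--         return
--     for first in range(budget + 1):
--         for rest in _comps(parts - 1, budget - first):
--             yield [first] + rest
--
--
-- def _render(gaps, groups):
--     out = '.' * gaps[0] + '#' * groups[0]
--     rest, grps = gaps[1:], groups[1:]
--     while grps:
--         out += '.' * (1 + rest[0]) + '#' * grps[0]
--         rest, grps = rest[1:], grps[1:]
--     return out + '.' * rest[0]
--
--
-- def gen_arrangements(groups, n):
--     if not groups:
--         yield '.' * n
--         return
--     k = len(groups)
--     s = n - sum(groups) - (k - 1)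
--     if s < 0:
--         return
--     for gaps in _comps(k + 1, s):
--         yield _render(gaps, groups)
-- ===== Notes on version B (the rewrite author's own statement) =====
-- stated objective: alternative
-- what changed: B computes the total slack n-sum(groups)-(k-1) once, enumerates the integer compositions of that slack into k+1 gaps in lexicographic order, and renders each composition to a string, instead of A's recursive search that interleaves string building with per-offset remaining-length bookkeeping and a feasibility test in every while-loop level.
-- outside the precondition, e.g. on gen_arrangements([0, -2], 0): A returns ['..', '..'], B returns ['..', '..', '..']; on gen_arrangements([8, -1, 150, -3, -3, -3778], 1): A returns [], B does not finish within the time limit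
import Mathlib
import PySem

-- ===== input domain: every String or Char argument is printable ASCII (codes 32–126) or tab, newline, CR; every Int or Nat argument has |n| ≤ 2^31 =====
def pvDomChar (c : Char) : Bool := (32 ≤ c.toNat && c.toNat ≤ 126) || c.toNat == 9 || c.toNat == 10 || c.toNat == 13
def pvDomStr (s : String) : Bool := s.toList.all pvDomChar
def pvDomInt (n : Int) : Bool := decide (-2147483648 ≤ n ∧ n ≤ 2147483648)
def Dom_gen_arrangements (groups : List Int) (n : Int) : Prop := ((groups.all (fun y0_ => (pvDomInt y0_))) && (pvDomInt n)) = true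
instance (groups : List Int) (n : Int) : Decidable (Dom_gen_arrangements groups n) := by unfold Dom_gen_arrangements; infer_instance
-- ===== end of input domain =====

-- B separates the combinatorics from the rendering: it computes the slack once, enumerates
-- integer compositions of it into the k+1 gaps, and renders each composition, instead of A's
-- recursive search interleaving string building with per-offset remaining-length bookkeeping.

-- '.'*m and '#'*m (Python repetition: empty for m ≤ 0)
def pyDots (m : Int) : String := String.ofList (List.replicate m.toNat '.')
def pyHashes (m : Int) : String := String.ofList (List.replicate m.toNat '#')

-- ===== PORT A =====
-- the 'while offset+head <= n' loop of A; recTail is the generator call on the tail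
def genLoopA (recTail : Int → List String) (head : Int) (tailEmpty : Bool) (n : Int) (offset : Int) : List String :=
  if _h : offset + head ≤ n then
    ((recTail (if tailEmpty then n - (offset + head) else n - (offset + head + 1))).map
      (fun next_chunk =>
        (if tailEmpty then pyDots offset ++ pyHashes head
         else pyDots offset ++ pyHashes head ++ ".") ++ next_chunk))
    ++ genLoopA recTail head tailEmpty n (offset + 1)
  else []
termination_by (n - head - offset + 1).toNat
decreasing_by omega

def gen_arrangements : List Int → Int → List String
  | [], n => [pyDots n]
  | head :: tail, n => genLoopA (gen_arrangements tail) head tail.isEmpty n 0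

-- ===== PORT B =====
-- all `parts`-tuples of nonnegative ints summing to `budget`, ascending lexicographic
def compsB : Nat → Int → List (List Int)
  | 0, _ => []          -- unreachable: always called with parts = k+1 ≥ 1
  | 1, budget => [[budget]]
  | (p+2), budget =>
      (PySem.List.pyRange 0 (budget + 1) 1).flatMap
        (fun first => (compsB (p+1) (budget - first)).map (fun rest => first :: rest))

-- the while-loop of _render: remaining gaps (one more than groups) and remaining groups
def renderRest : List Int → List Int → String
  | rest, [] => pyDots rest.headI
  | [], _ :: _ => ""    -- unreachable: gaps is one longer than groups
  | g :: gs, grp :: grps => pyDots (1 + g) ++ pyHashes grp ++ renderRest gs grps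

def renderB (gaps : List Int) (groups : List Int) : String :=
  match gaps, groups with
  | g0 :: rest, grp0 :: grps => pyDots g0 ++ pyHashes grp0 ++ renderRest rest grps
  | _, _ => ""          -- unreachable: both nonempty when called

def gen_arrangements_alt (groups : List Int) (n : Int) : List String :=
  if groups.isEmpty then [pyDots n]
  else
    let s := n - groups.sum - ((groups.length : Int) - 1)
    if s < 0 then []
    else (compsB (groups.length + 1) s).map (fun gaps => renderB gaps groups)

-- ===== PRECONDITION & SPEC =====
-- Pre_ restricts to the natural domain of nonnegative group sizes: on lists containing a
-- negative "group", A still returns, but the number of duplicate strings it emits is an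
-- accident of its '#'*negative == '' arithmetic and B does not reproduce it.
def Pre_gen_arrangements (groups : List Int) (n : Int) : Prop := ∀ g ∈ groups, 0 ≤ g
instance (groups : List Int) (n : Int) : Decidable (Pre_gen_arrangements groups n) := by
  unfold Pre_gen_arrangements; infer_instance

def pvWitness_gen_arrangements : List Int × Int := ([1, 2], 6)

def Spec_gen_arrangements (groups : List Int) (n : Int) (out : List String) : Prop := out = gen_arrangements_alt groups n
instance (groups : List Int) (n : Int) (out : List String) : Decidable (Spec_gen_arrangements groups n out) := by unfold Spec_gen_arrangements; infer_instance

-- ===== CLAIM (what is proved, stated in full; the proofs are below) =====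
def Claim_equal_gen_arrangements : Prop := ∀ (groups : List Int) (n : Int), Dom_gen_arrangements groups n → Pre_gen_arrangements groups n → Spec_gen_arrangements groups n (gen_arrangements groups n)

-- ===== LEMMAS AND PROOFS =====

lemma dot_dots (g : Int) (h : 0 ≤ g) : "." ++ pyDots g = pyDots (1 + g) := by
  apply String.toList_inj.mp
  unfold pyDots
  have h1 : (1 + g).toNat = g.toNat + 1 := by omega
  simp [h1, List.replicate_succ]

-- unrolling genLoopA into a flatMap over the range of offsets
lemma genLoopA_eq (recTail : Int → List String) (head : Int) (te : Bool) (n : Int) :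
    ∀ offset, genLoopA recTail head te n offset =
      (PySem.List.pyRange offset (n - head + 1) 1).flatMap
        (fun o => (recTail (if te then n - (o + head) else n - (o + head + 1))).map
          (fun c => (if te then pyDots o ++ pyHashes head
                     else pyDots o ++ pyHashes head ++ ".") ++ c)) := by
  have key : ∀ (f : Nat) (offset : Int), (n - head - offset + 1).toNat ≤ f →
      genLoopA recTail head te n offset =
        (PySem.List.pyRange offset (n - head + 1) 1).flatMap
          (fun o => (recTail (if te then n - (o + head) else n - (o + head + 1))).map
            (fun c => (if te then pyDots o ++ pyHashes head
                       else pyDots o ++ pyHashes head ++ ".") ++ c)) := by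
    intro f
    induction f with
    | zero =>
      intro offset h0
      rw [genLoopA, dif_neg (by omega : ¬ (offset + head ≤ n)),
        PySem.List.pyRange_one_eq_nil (by omega)]
      simp
    | succ f ih =>
      intro offset hle
      by_cases hc : offset + head ≤ n
      · rw [genLoopA, dif_pos hc,
          PySem.List.pyRange_one_cons (by omega : offset < n - head + 1),
          List.flatMap_cons, ih (offset + 1) (by omega)]
      · rw [genLoopA, dif_neg hc, PySem.List.pyRange_one_eq_nil (by omega)]
        simp
  intro offset
  exact key (n - head - offset + 1).toNat offset le_rfl

lemma compsB_two (s : Int) :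
    compsB 2 s = (PySem.List.pyRange 0 (s + 1) 1).flatMap (fun first => [[first, s - first]]) := by
  show compsB (0 + 2) s = _
  rw [compsB]
  exact List.flatMap_congr (fun first _ => by rw [compsB]; rfl)

-- every composition of a nonnegative budget starts with a nonnegative entry
lemma compsB_head_nonneg (p : Nat) (budget : Int) (hb : 0 ≤ budget) :
    ∀ gaps ∈ compsB (p + 1) budget, ∃ g0 rest, gaps = g0 :: rest ∧ 0 ≤ g0 := by
  intro gaps hmem
  match p with
  | 0 =>
    rw [compsB] at hmem
    simp only [List.mem_singleton] at hmem
    exact ⟨budget, [], hmem, hb⟩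
  | q + 1 =>
    rw [(by rfl : q + 1 + 1 = q + 2), compsB] at hmem
    simp only [List.mem_flatMap, List.mem_map] at hmem
    obtain ⟨first, hfirst, rest, _, hgaps⟩ := hmem
    exact ⟨first, rest, hgaps.symm, (PySem.List.mem_pyRange_one.mp hfirst).1⟩

lemma flatMap_nil_of {a b : Type} (l : List a) (f : a → List b) (h : ∀ x ∈ l, f x = []) :
    l.flatMap f = [] := by
  rw [List.flatMap_congr (g := fun _ => []) h]
  simp

lemma compsB_succ_succ (p : Nat) (budget : Int) :
    compsB (p + 2) budget = (PySem.List.pyRange 0 (budget + 1) 1).flatMap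
      (fun first => (compsB (p + 1) (budget - first)).map (fun rest => first :: rest)) := by
  rw [compsB]

-- main characterisation: A's recursion computes B's rendered compositions
lemma genA_char : ∀ (tail : List Int), (∀ g ∈ tail, 0 ≤ g) → ∀ (head n : Int),
    gen_arrangements (head :: tail) n =
      (if n - (head :: tail).sum - (((head :: tail).length : Int) - 1) < 0 then []
       else (compsB ((head :: tail).length + 1)
              (n - (head :: tail).sum - (((head :: tail).length : Int) - 1))).map
              (fun gaps => renderB gaps (head :: tail))) := by
  intro tail
  induction tail with
  | nil =>
    intro _ head n
    rw [gen_arrangements, genLoopA_eq]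
    have e1 : n - ([head] : List Int).sum - ((([head] : List Int).length : Int) - 1) = n - head := by
      simp
    rw [e1]
    simp only [List.isEmpty_nil, if_true]
    by_cases hs : n - head < 0
    · rw [if_pos hs, PySem.List.pyRange_one_eq_nil (by omega)]
      simp
    · rw [if_neg hs]
      have e2 : ([head] : List Int).length + 1 = 2 := by simp
      rw [e2, compsB_two, List.map_flatMap]
      apply List.flatMap_congr
      intro o _ho
      simp only [gen_arrangements, List.map_cons, List.map_nil, List.cons.injEq, and_true]
      apply String.toList_inj.mp
      have e3 : n - (o + head) = n - head - o := by ring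
      rw [e3]
      simp [renderB, renderRest, pyDots, pyHashes]
  | cons t ts ih =>
    intro hpre head n
    have hprets : ∀ g ∈ ts, 0 ≤ g := fun g hg => hpre g (List.mem_cons_of_mem _ hg)
    have hS : 0 ≤ (t :: ts).sum := List.sum_nonneg hpre
    have hK : 1 ≤ ((t :: ts).length : Int) := by
      simp [List.length_cons]
    set s : Int := n - (head + (t :: ts).sum) - ((t :: ts).length : Int) with hsdef
    have eRHS : n - (head :: t :: ts).sum - (((head :: t :: ts).length : Int) - 1) = s := by
      rw [hsdef]
      simp only [List.sum_cons, List.length_cons]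
      push_cast
      ring
    have eIN : ∀ o : Int,
        n - (o + head + 1) - (t :: ts).sum - (((t :: ts).length : Int) - 1) = s - o := by
      intro o
      rw [hsdef]
      ring
    rw [gen_arrangements, genLoopA_eq, eRHS]
    simp only [List.isEmpty_cons, Bool.false_eq_true, if_false]
    by_cases hneg : s < 0
    · rw [if_pos hneg]
      apply flatMap_nil_of
      intro o ho
      have h0o : 0 ≤ o := (PySem.List.mem_pyRange_one.mp ho).1
      rw [ih hprets t (n - (o + head + 1)), eIN o, if_pos (by omega : s - o < 0)]
      simp
    · rw [if_neg hneg]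
      have e4 : (head :: t :: ts).length + 1 = (ts.length + 1) + 2 := by
        simp [List.length_cons]
      rw [e4, compsB_succ_succ, List.map_flatMap,
        PySem.List.pyRange_one_append 0 (s + 1) (n - head + 1) (by omega) (by omega),
        List.flatMap_append]
      have e5 : (PySem.List.pyRange (s + 1) (n - head + 1) 1).flatMap
          (fun o => (gen_arrangements (t :: ts) (n - (o + head + 1))).map
            (fun c => (pyDots o ++ pyHashes head ++ ".") ++ c)) = [] := by
        apply flatMap_nil_of
        intro o ho
        have : s + 1 ≤ o := (PySem.List.mem_pyRange_one.mp ho).1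
        rw [ih hprets t (n - (o + head + 1)), eIN o, if_pos (by omega : s - o < 0)]
        simp
      rw [e5, List.append_nil]
      apply List.flatMap_congr
      intro o ho
      have h0o : 0 ≤ o := (PySem.List.mem_pyRange_one.mp ho).1
      have hos : o < s + 1 := (PySem.List.mem_pyRange_one.mp ho).2
      rw [ih hprets t (n - (o + head + 1)), eIN o, if_neg (by omega : ¬ (s - o < 0)),
        List.map_map, List.map_map]
      apply List.map_congr_left
      intro rest hrest
      obtain ⟨g0, r', rfl, hg0⟩ :=
        compsB_head_nonneg (ts.length + 1) (s - o) (by omega) rest hrest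
      simp only [Function.comp_apply, renderB, renderRest]
      rw [← dot_dots g0 hg0]
      simp [String.append_assoc]

-- ===== VERDICT (by name: the statement is the Claim_ definition above) =====
theorem gen_arrangements_spec : Claim_equal_gen_arrangements := by
  intro groups n _hdom hpre
  unfold Spec_gen_arrangements
  match groups with
  | [] => simp [gen_arrangements, gen_arrangements_alt]
  | head :: tail =>
    have h := genA_char tail (fun g hg => hpre g (List.mem_cons_of_mem _ hg)) head n
    rw [h]
    simp only [gen_arrangements_alt, List.isEmpty_cons]
    rfl
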